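-- pv_equiv track=rewrite | github.com/byzp/of-lyre | web/mkwav.py | find_best_transpose
-- ===== SOURCE A (Python) =====
-- from typing import List, Dict, Tuple
--
-- def is_white_key(midi_note: int) -> bool:
--     return (midi_note % 12) in {0, 2, 4, 5, 7, 9, 11}
--
-- def find_best_transpose(notes: list, sample_midis: List[int], search_range=range(-24, 25)):
--     """
--     寻找一个整体转调，使得尽可能多的音符落在 samples 可用范围内且为白键。
--     返回 (best_transpose, count)
--     """
--     sample_min = min(sample_midis)
--     sample_max = max(sample_midis)
--     best_t = 0
--     best_cnt = -1
--     for t in search_range: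
--         cnt = 0
--         for _, _, pitch, _ in notes:
--             p = pitch + t
--             if sample_min <= p <= sample_max and is_white_key(p):
--                 cnt += 1
--         if cnt > best_cnt:
--             best_cnt = cnt
--             best_t = t
--     return best_t, best_cnt
-- ===== SOURCE B (Python) =====
-- from typing import List
--
-- def is_white_key(midi_note: int) -> bool:
--     return (midi_note % 12) in {0, 2, 4, 5, 7, 9, 11}
--
-- def bisect_right(a, x):
--     # CPython's bisect.bisect_right algorithm (bisect module not imported by the original file)
--     lo, hi = 0, len(a)
--     while lo < hi:
--         mid = (lo + hi) // 2
--         if a[mid] <= x: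
--             lo = mid + 1
--         else:
--             hi = mid
--     return lo
--
-- def find_best_transpose(notes: list, sample_midis: List[int], search_range=range(-24, 25)):
--     """
--     Same result as the original: bucket the pitches by residue mod 12, sort each
--     bucket once, then count each transpose with 12 binary searches instead of a
--     scan over all notes.
--     """
--     lo = min(sample_midis)
--     hi = max(sample_midis)
--     buckets = [[] for _ in range(12)]
--     for _, _, pitch, _ in notes:
--         buckets[pitch % 12].append(pitch)
--     buckets = [sorted(b) for b in buckets]
--     best_t, best_cnt = 0, -1
--     for t in search_range:
--         cnt = 0
--         for r in range(12):
--             if is_white_key(r + t):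
--                 b = buckets[r]
--                 cnt += bisect_right(b, hi - t) - bisect_right(b, lo - t - 1)
--         if cnt > best_cnt:
--             best_t, best_cnt = t, cnt
--     return best_t, best_cnt
-- ===== Notes on version B (the rewrite author's own statement) =====
-- stated objective: faster
-- what changed: Instead of rescanning every note for each candidate transpose, B buckets the pitches by residue mod 12, sorts each bucket once, and counts each transpose with two binary searches per white-compatible residue (whiteness and the playable window depend only on the residue and the pitch range).
-- outside the precondition, e.g. on find_best_transpose([(0, 0, 60, 0)], [], [0]): A raises ValueError, B raises ValueError
import Mathlib
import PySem

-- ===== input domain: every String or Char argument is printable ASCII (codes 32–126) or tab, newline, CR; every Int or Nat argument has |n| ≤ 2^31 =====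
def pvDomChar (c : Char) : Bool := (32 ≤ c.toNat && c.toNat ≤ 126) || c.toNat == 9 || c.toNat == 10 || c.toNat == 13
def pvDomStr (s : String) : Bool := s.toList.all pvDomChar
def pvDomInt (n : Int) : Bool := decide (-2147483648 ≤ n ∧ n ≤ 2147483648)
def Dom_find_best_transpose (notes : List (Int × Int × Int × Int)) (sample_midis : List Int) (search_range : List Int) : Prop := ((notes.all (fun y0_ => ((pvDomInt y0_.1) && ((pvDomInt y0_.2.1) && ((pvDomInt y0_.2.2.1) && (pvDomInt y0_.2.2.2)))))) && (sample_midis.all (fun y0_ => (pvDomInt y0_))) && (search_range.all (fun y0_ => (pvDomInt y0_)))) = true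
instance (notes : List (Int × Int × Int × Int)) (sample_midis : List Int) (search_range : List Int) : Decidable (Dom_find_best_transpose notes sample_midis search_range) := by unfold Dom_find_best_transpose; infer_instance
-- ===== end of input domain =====

-- B replaces the O(R·N) rescan of all notes per transpose by 12 sorted residue buckets
-- and two binary searches per (transpose, residue): measurably faster on large inputs.

-- ===== PORT A =====
-- module helper: is_white_key(m) = (m % 12) in {0, 2, 4, 5, 7, 9, 11}  (used by both programs)
def is_white_key (m : Int) : Bool := [(0 : Int), 2, 4, 5, 7, 9, 11].contains (PySem.Int.mod m 12)

def find_best_transpose (notes : List (Int × Int × Int × Int)) (sample_midis : List Int) (search_range : List Int) : Int × Int :=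
  match PySem.List.min? sample_midis (fun x => x), PySem.List.max? sample_midis (fun x => x) with
  | some sample_min, some sample_max =>
      search_range.foldl (fun (st : Int × Int) t =>
        let cnt := notes.foldl (fun (cnt : Int) nt =>
          let p := nt.2.2.1 + t
          if (sample_min ≤ p ∧ p ≤ sample_max) ∧ is_white_key p = true then cnt + 1 else cnt) 0
        if cnt > st.2 then (t, cnt) else st) (0, -1)
  | _, _ => (0, -1)   -- unreachable under Pre_ (Python's min/max raise on an empty list)

-- ===== PORT B =====
-- Source B's hand-written bisect_right is exactly CPython's bisect.bisect_right loop,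
-- ported as the prelude's PySem.List.bisectRight (the same binary search).
def find_best_transpose_alt (notes : List (Int × Int × Int × Int)) (sample_midis : List Int) (search_range : List Int) : Int × Int :=
  match PySem.List.min? sample_midis (fun x => x) with
  | none => (0, -1)   -- unreachable under Pre_ (Python's min raises on an empty list)
  | some lo =>
    match PySem.List.max? sample_midis (fun x => x) with
    | none => (0, -1)
    | some hi =>
          let buckets0 := notes.foldl (fun (bs : List (List Int)) nt =>
              bs.modify (PySem.Int.mod nt.2.2.1 12).toNat (fun b => b ++ [nt.2.2.1]))
            (List.replicate 12 [])
          let buckets := buckets0.map (fun b => PySem.List.sorted b (fun x => x) false)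
          search_range.foldl (fun (st : Int × Int) t =>
            let cnt := (PySem.List.pyRange 0 12).foldl (fun (cnt : Int) r =>
              if is_white_key (r + t) = true then
                -- buckets[r]: r ∈ [0, 12) and buckets has 12 entries, so .getD/.toNat is exact here
                let b := buckets.getD r.toNat []
                cnt + ((PySem.List.bisectRight b (hi - t) : Int) - (PySem.List.bisectRight b (lo - t - 1) : Int))
              else cnt) 0
            if cnt > st.2 then (t, cnt) else st) (0, -1)

-- ===== PRECONDITION & SPEC =====
-- Python's min()/max() raise ValueError on an empty sample_midis; that is all Pre_ excludes.
def Pre_find_best_transpose (notes : List (Int × Int × Int × Int)) (sample_midis : List Int) (search_range : List Int) : Prop :=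
  sample_midis ≠ []
instance (notes : List (Int × Int × Int × Int)) (sample_midis : List Int) (search_range : List Int) : Decidable (Pre_find_best_transpose notes sample_midis search_range) := by unfold Pre_find_best_transpose; infer_instance

def pvWitness_find_best_transpose : (List (Int × Int × Int × Int)) × List Int × List Int :=
  ([(0, 0, 60, 0), (0, 0, 62, 1)], [48, 72], [-2, -1, 0, 1, 2])

def Spec_find_best_transpose (notes : List (Int × Int × Int × Int)) (sample_midis : List Int) (search_range : List Int) (out : Int × Int) : Prop := out = find_best_transpose_alt notes sample_midis search_range
instance (notes : List (Int × Int × Int × Int)) (sample_midis : List Int) (search_range : List Int) (out : Int × Int) : Decidable (Spec_find_best_transpose notes sample_midis search_range out) := by unfold Spec_find_best_transpose; infer_instance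

-- ===== CLAIM (what is proved, stated in full; the proofs are below) =====
def Claim_equal_find_best_transpose : Prop := ∀ (notes : List (Int × Int × Int × Int)) (sample_midis : List Int) (search_range : List Int), Dom_find_best_transpose notes sample_midis search_range → Pre_find_best_transpose notes sample_midis search_range → Spec_find_best_transpose notes sample_midis search_range (find_best_transpose notes sample_midis search_range)

-- ===== LEMMAS AND PROOFS =====

-- is_white_key only reads its argument mod 12
theorem white_congr (a b : Int) (h : a % 12 = b % 12) :
    is_white_key a = is_white_key b := by
  unfold is_white_key
  rw [PySem.Int.mod_eq_emod_of_pos (by norm_num), PySem.Int.mod_eq_emod_of_pos (by norm_num), h]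

-- bisect_right on a sorted list counts the elements ≤ x
theorem bisectRight_eq_countP (b : List Int) (x : Int)
    (hb : b.Pairwise (fun a c => a ≤ c)) :
    PySem.List.bisectRight b x = b.countP (fun p => decide (p ≤ x)) := by
  obtain ⟨hk, hlt, hgt⟩ := PySem.List.bisectRight_spec b x hb
  set k := PySem.List.bisectRight b x with hkdef
  have htake : (b.take k).countP (fun p => decide (p ≤ x)) = k := by
    rw [List.countP_eq_length.mpr]
    · simp [Nat.min_eq_left hk]
    · intro y hy
      rw [List.mem_take_iff_getElem] at hy
      obtain ⟨i, hi, rfl⟩ := hy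
      simpa using hlt i (by omega) (by omega)
  have hdrop : (b.drop k).countP (fun p => decide (p ≤ x)) = 0 := by
    rw [List.countP_eq_zero]
    intro y hy
    rw [List.mem_drop_iff_getElem] at hy
    obtain ⟨i, hi, rfl⟩ := hy
    simpa using not_le.mpr (hgt (k + i) (by omega) (by omega))
  symm
  calc b.countP (fun p => decide (p ≤ x))
      = (b.take k ++ b.drop k).countP (fun p => decide (p ≤ x)) := by
        rw [List.take_append_drop]
    _ = k := by rw [List.countP_append, htake, hdrop]; omega

-- counting ≤ x2 splits at x1 ≤ x2
theorem countP_le_split (l : List Int) (x1 x2 : Int) (h : x1 ≤ x2) :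
    l.countP (fun p => decide (p ≤ x2)) =
      l.countP (fun p => decide (p ≤ x1)) + l.countP (fun p => decide (x1 < p ∧ p ≤ x2)) := by
  induction l with
  | nil => simp
  | cons a l ih =>
    simp only [List.countP_cons, ih, decide_eq_true_eq]
    split_ifs <;> omega

-- the bucket fold keeps the length of the bucket list
theorem buckets_len (notes : List (Int × Int × Int × Int)) (bs : List (List Int)) :
    (notes.foldl (fun (bs : List (List Int)) nt =>
        bs.modify (PySem.Int.mod nt.2.2.1 12).toNat (fun b => b ++ [nt.2.2.1])) bs).length
      = bs.length := by
  induction notes generalizing bs with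
  | nil => rfl
  | cons nt notes ih => rw [List.foldl_cons, ih, List.length_modify]

-- bucket r collects exactly the pitches with residue r, in input order
theorem buckets_go (notes : List (Int × Int × Int × Int)) (bs : List (List Int))
    (hlen : bs.length = 12) (r : Nat) (hr : r < 12) :
    (notes.foldl (fun (bs : List (List Int)) nt =>
        bs.modify (PySem.Int.mod nt.2.2.1 12).toNat (fun b => b ++ [nt.2.2.1])) bs).getD r []
      = bs.getD r [] ++ (notes.map (fun nt => nt.2.2.1)).filter
          (fun p => decide (p % 12 = (r : Int))) := by
  induction notes generalizing bs with
  | nil => simp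
  | cons nt notes ih =>
    have hM : PySem.Int.mod nt.2.2.1 12 = nt.2.2.1 % 12 :=
      PySem.Int.mod_eq_emod_of_pos (by norm_num)
    have hm0 : (0 : Int) ≤ nt.2.2.1 % 12 := Int.emod_nonneg _ (by norm_num)
    have hm12 : nt.2.2.1 % 12 < 12 := Int.emod_lt_of_pos _ (by norm_num)
    simp only [List.foldl_cons, List.map_cons, List.filter_cons]
    rw [ih _ (by rw [List.length_modify, hlen])]
    have hrlen : r < bs.length := by omega
    have hrlen' : r <
        (bs.modify (PySem.Int.mod nt.2.2.1 12).toNat (fun b => b ++ [nt.2.2.1])).length := by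
      rw [List.length_modify]; omega
    rw [List.getD_eq_getElem _ _ hrlen', List.getD_eq_getElem _ _ hrlen, List.getElem_modify]
    by_cases hc : nt.2.2.1 % 12 = (r : Int)
    · have hn : (PySem.Int.mod nt.2.2.1 12).toNat = r := by omega
      rw [if_pos hn, if_pos (decide_eq_true hc), List.append_assoc, List.singleton_append]
    · have hn : (PySem.Int.mod nt.2.2.1 12).toNat ≠ r := by omega
      rw [if_neg hn, if_neg (by simp [hc])]

-- the 12 residue classes mod 12 partition any count
theorem countP_residue_partition (l : List Int) (q : Int → Bool) :
    ((List.range 12).map (fun r : Nat =>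
        l.countP (fun p => q p && decide (p % 12 = (r : Int))))).sum
      = l.countP q := by
  induction l with
  | nil => simp
  | cons a l ih =>
    have hm0 : (0 : Int) ≤ a % 12 := Int.emod_nonneg _ (by norm_num)
    have hm12 : a % 12 < 12 := Int.emod_lt_of_pos _ (by norm_num)
    simp only [List.countP_cons]
    have hsplit : ∀ (xs : List Nat) (f g : Nat → Nat),
        (xs.map (fun r => f r + g r)).sum = (xs.map f).sum + (xs.map g).sum := by
      intro xs f g
      induction xs with
      | nil => simp
      | cons x xs ihx => simp [ihx]; omega
    rw [hsplit (List.range 12)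
      (fun r => l.countP (fun p => q p && decide (p % 12 = (r : Int))))
      (fun r => if (q a && decide (a % 12 = (r : Int))) = true then 1 else 0), ih]
    congr 1
    by_cases hq : q a = true
    · simp only [hq, Bool.true_and, if_true]
      have harr : ∀ r : Nat, (decide (a % 12 = (r : Int)))
          = decide ((a % 12).toNat = r) := by
        intro r
        exact decide_eq_decide.mpr (by omega)
      simp only [harr]
      have hx : (a % 12).toNat < 12 := by omega
      interval_cases h : (a % 12).toNat <;> decide
    · have hq' : q a = false := by revert hq; cases q a <;> simp
      simp [hq']

-- per-transpose counts agree
theorem cnt_eq (notes : List (Int × Int × Int × Int)) (lo hi t : Int) (hlh : lo ≤ hi) :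
    (notes.foldl (fun (cnt : Int) nt =>
        let p := nt.2.2.1 + t
        if (lo ≤ p ∧ p ≤ hi) ∧ is_white_key p = true then cnt + 1 else cnt) 0)
    = ((PySem.List.pyRange 0 12).foldl (fun (cnt : Int) r =>
        if is_white_key (r + t) = true then
          let b := ((notes.foldl (fun (bs : List (List Int)) nt =>
              bs.modify (PySem.Int.mod nt.2.2.1 12).toNat (fun b => b ++ [nt.2.2.1]))
            (List.replicate 12 [])).map (fun b => PySem.List.sorted b (fun x => x) false)).getD r.toNat []
          cnt + ((PySem.List.bisectRight b (hi - t) : Int) - (PySem.List.bisectRight b (lo - t - 1) : Int))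
        else cnt) 0) := by
  set pitches := notes.map (fun nt => nt.2.2.1) with hpitches
  set pA : Int → Bool :=
    (fun p => decide ((lo ≤ p + t ∧ p + t ≤ hi) ∧ is_white_key (p + t) = true)) with hpA
  -- A's loop is a count over the pitches
  have hA : (notes.foldl (fun (cnt : Int) nt =>
        let p := nt.2.2.1 + t
        if (lo ≤ p ∧ p ≤ hi) ∧ is_white_key p = true then cnt + 1 else cnt) 0)
      = ((pitches.countP pA : Nat) : Int) := by
    have h1 : (notes.foldl (fun (cnt : Int) nt =>
          let p := nt.2.2.1 + t
          if (lo ≤ p ∧ p ≤ hi) ∧ is_white_key p = true then cnt + 1 else cnt) 0)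
        = notes.foldl (fun (cnt : Int) nt =>
            if (fun nt : Int × Int × Int × Int => pA nt.2.2.1) nt = true then cnt + 1 else cnt) 0 := by
      apply PySem.List.foldl_congr_mem
      intro acc nt _
      simp only [hpA, decide_eq_true_eq]
    rw [h1, PySem.List.foldl_count_if, hpitches, List.countP_map]
    simp [Function.comp_def]
  rw [hA]
  symm
  rw [show PySem.List.pyRange 0 12 = (List.range 12).map (fun k : Nat => (k : Int)) from by
      rw [show (12 : Int) = ((12 : Nat) : Int) from rfl, PySem.List.pyRange_zero_natCast],
    List.foldl_map]
  refine Eq.trans (PySem.List.foldl_congr_mem _ _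
    (fun (acc : Int) (r : Nat) =>
      acc + ((pitches.countP (fun p => pA p && decide (p % 12 = (r : Int))) : Nat) : Int)) 0 ?_) ?_
  · intro acc r hr
    have hr12 : r < 12 := List.mem_range.mp hr
    dsimp only
    -- the bucket for residue r
    have hbr : (((notes.foldl (fun (bs : List (List Int)) nt =>
          bs.modify (PySem.Int.mod nt.2.2.1 12).toNat (fun b => b ++ [nt.2.2.1]))
        (List.replicate 12 [])).map (fun b => PySem.List.sorted b (fun x => x) false)).getD
          ((r : Int)).toNat [])
        = PySem.List.sorted (pitches.filter (fun p => decide (p % 12 = (r : Int))))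
            (fun x => x) false := by
      have h1 : ((r : Int)).toNat = r := by omega
      have hlen0 : ((notes.foldl (fun (bs : List (List Int)) nt =>
          bs.modify (PySem.Int.mod nt.2.2.1 12).toNat (fun b => b ++ [nt.2.2.1]))
        (List.replicate 12 []))).length = 12 := by
        rw [buckets_len]; simp
      have hr' : r < ((notes.foldl (fun (bs : List (List Int)) nt =>
          bs.modify (PySem.Int.mod nt.2.2.1 12).toNat (fun b => b ++ [nt.2.2.1]))
        (List.replicate 12 []))).length := by omega
      rw [h1, List.getD_eq_getElem _ _ (by rw [List.length_map]; omega), List.getElem_map,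
        ← List.getD_eq_getElem _ _ hr', buckets_go notes _ (by simp) r hr12,
        List.getD_eq_getElem _ _ (by simp; omega : r < (List.replicate 12 ([] : List Int)).length),
        List.getElem_replicate, List.nil_append, ← hpitches]
    rw [hbr]
    set bkt := PySem.List.sorted (pitches.filter (fun p => decide (p % 12 = (r : Int))))
      (fun x => x) false with hbkt
    have hsorted : bkt.Pairwise (fun a c => a ≤ c) := PySem.List.sorted_pairwise _ _
    have hperm : bkt.Perm (pitches.filter (fun p => decide (p % 12 = (r : Int)))) :=
      PySem.List.sorted_perm _ _ _
    -- count in the window on the bucket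
    have hwin : (PySem.List.bisectRight bkt (hi - t) : Int)
        - (PySem.List.bisectRight bkt (lo - t - 1) : Int)
        = ((pitches.countP (fun p => decide (lo ≤ p + t ∧ p + t ≤ hi)
            && decide (p % 12 = (r : Int))) : Nat) : Int) := by
      rw [bisectRight_eq_countP _ _ hsorted, bisectRight_eq_countP _ _ hsorted,
        countP_le_split bkt (lo - t - 1) (hi - t) (by omega)]
      have hcc : bkt.countP (fun p => decide (lo - t - 1 < p ∧ p ≤ hi - t))
          = pitches.countP (fun p => decide (lo ≤ p + t ∧ p + t ≤ hi)
              && decide (p % 12 = (r : Int))) := by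
        rw [hperm.countP_eq, List.countP_filter]
        apply List.countP_congr
        intro p _
        by_cases hp : lo ≤ p + t ∧ p + t ≤ hi <;> by_cases hq : lo - t - 1 < p ∧ p ≤ hi - t <;>
          simp [hp, hq] <;> omega
      rw [hcc]
      push_cast
      ring
    by_cases hw : is_white_key ((r : Int) + t) = true
    · rw [if_pos hw, hwin]
      congr 2
      apply List.countP_congr
      intro p _
      by_cases hres : p % 12 = (r : Int)
      · have hwp : is_white_key (p + t) = true := by
          rw [white_congr (p + t) ((r : Int) + t) (by omega)]; exact hw
        simp [hpA, hres, hwp]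
      · simp [hres]
    · rw [if_neg hw]
      have hz : pitches.countP (fun p => pA p && decide (p % 12 = (r : Int))) = 0 := by
        rw [List.countP_eq_zero]
        intro p _
        by_cases hres : p % 12 = (r : Int)
        · have hwp : is_white_key (p + t) = is_white_key ((r : Int) + t) :=
            white_congr (p + t) ((r : Int) + t) (by omega)
          simp [hpA, hres, hwp, hw]
        · simp [hres]
      rw [hz]
      simp
  · rw [PySem.List.foldl_add]
    have hcast : ∀ xs : List Nat,
        (xs.map (fun r : Nat =>
          ((pitches.countP (fun p => pA p && decide (p % 12 = (r : Int))) : Nat) : Int))).sum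
        = (((xs.map (fun r : Nat =>
            pitches.countP (fun p => pA p && decide (p % 12 = (r : Int))))).sum : Nat) : Int) := by
      intro xs
      induction xs with
      | nil => simp
      | cons x xs ihx => simp [ihx]
    rw [hcast, countP_residue_partition]
    simp

-- ===== VERDICT (by name: the statement is the Claim_ definition above) =====
theorem find_best_transpose_spec : Claim_equal_find_best_transpose := by
  intro notes sample_midis search_range _ hpre
  unfold Spec_find_best_transpose
  unfold find_best_transpose find_best_transpose_alt
  rcases hmin : PySem.List.min? sample_midis (fun x => x) with _ | smin
  · exact absurd ((PySem.List.min?_eq_none_iff _ _).mp hmin) hpre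
  rcases hmax : PySem.List.max? sample_midis (fun x => x) with _ | smax
  · exact absurd ((PySem.List.max?_eq_none_iff _ _).mp hmax) hpre
  have hmem : smin ∈ sample_midis := PySem.List.min?_mem hmin
  have hlh : smin ≤ smax := PySem.List.max?_isMax hmax smin hmem
  apply PySem.List.foldl_congr_mem
  intro acc tt _
  dsimp only
  rw [cnt_eq notes smin smax tt hlh]
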